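-- pv_equiv track=rewrite | github.com/alswo1212/jungle_baekjoon | 프로그래머스/3/12938. 최고의 집합/최고의 집합.py | solution
-- ===== SOURCE A (Python) =====
-- def solution(n, s):
--     answer = []
--     while n != 0:
--         temp = s // n
--         if temp == 0:
--             return [-1]
--         answer.append(temp)
--         n -= 1
--         s -= temp
--
--     return answer
-- ===== SOURCE B (Python) =====
-- def solution(n, s):
--     if n == 0:
--         return []
--     if -n < s < n:
--         return [-1]
--     q, r = divmod(s, n)
--     return [q] * (n - r) + [q + 1] * r
-- ===== Notes on version B (the rewrite author's own statement) =====
-- stated objective: simpler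
-- what changed: Replaces the while-loop handing out s//n per slot with a single divmod: [q]*(n-r)+[q+1]*r, with up-front guards for n==0 and the zero-part case -n<s<n.
-- outside the precondition, e.g. on solution(-5, -2): A returns [-1], B returns []
import Mathlib
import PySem

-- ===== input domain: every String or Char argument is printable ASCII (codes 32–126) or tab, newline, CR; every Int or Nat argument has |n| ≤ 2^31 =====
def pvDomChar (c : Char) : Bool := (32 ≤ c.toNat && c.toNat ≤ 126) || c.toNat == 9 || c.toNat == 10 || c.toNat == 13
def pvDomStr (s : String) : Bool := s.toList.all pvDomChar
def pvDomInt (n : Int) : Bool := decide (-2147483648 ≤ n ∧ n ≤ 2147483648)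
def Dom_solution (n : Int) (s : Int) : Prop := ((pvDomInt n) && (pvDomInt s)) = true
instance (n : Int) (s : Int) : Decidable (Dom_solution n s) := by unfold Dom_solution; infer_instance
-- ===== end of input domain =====

-- B replaces A's per-slot while-loop by one divmod and two List.replicate spans (objective: simpler).
-- Equivalence about RETURN values on Pre_solution (n ≥ 0); A never mutates its arguments.

-- ===== PORT A =====
-- the while loop, fueled by n.toNat (for n ≥ 0 the loop runs exactly n times; n < 0 is outside Pre_)
def solutionLoop : Nat → Int → Int → List Int → List Int
  | 0, _, _, answer => answer
  | Nat.succ f, n, s, answer =>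
    if n = 0 then answer
    else
      let temp := PySem.Int.floordiv s n
      if temp = 0 then [-1]
      else solutionLoop f (n - 1) (s - temp) (answer ++ [temp])

def solution (n : Int) (s : Int) : List Int := solutionLoop n.toNat n s []

-- ===== PORT B =====
def solution_alt (n : Int) (s : Int) : List Int :=
  if n = 0 then []
  else if -n < s ∧ s < n then [-1]
  else
    let q := PySem.Int.floordiv s n
    let r := PySem.Int.mod s n
    List.replicate (n - r).toNat q ++ List.replicate r.toNat (q + 1)

-- ===== PRECONDITION & SPEC =====
-- Pre_ excludes n < 0, where Python A's loop counts n downward away from 0 and, depending on s,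
-- either diverges or aborts with [-1] — an accident of the loop; B's natural domain is n ≥ 0.
def Pre_solution (n : Int) (s : Int) : Prop := 0 ≤ n
instance (n : Int) (s : Int) : Decidable (Pre_solution n s) := by unfold Pre_solution; infer_instance
def pvWitness_solution : Int × Int := (3, 7)

def Spec_solution (n : Int) (s : Int) (out : List Int) : Prop := out = solution_alt n s
instance (n : Int) (s : Int) (out : List Int) : Decidable (Spec_solution n s out) := by unfold Spec_solution; infer_instance

-- ===== CLAIM (what is proved, stated in full; the proofs are below) =====
def Claim_equal_solution : Prop := ∀ (n : Int) (s : Int), Dom_solution n s → Pre_solution n s → Spec_solution n s (solution n s)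

-- ===== LEMMAS AND PROOFS =====

theorem solutionLoop_zero (f : Nat) (s : Int) (acc : List Int) :
    solutionLoop f 0 s acc = acc := by
  cases f <;> simp [solutionLoop]

theorem solutionLoop_succ (f : Nat) (n s : Int) (acc : List Int) (h : n ≠ 0) :
    solutionLoop (f + 1) n s acc =
      if PySem.Int.floordiv s n = 0 then [-1]
      else solutionLoop f (n - 1) (s - PySem.Int.floordiv s n)
             (acc ++ [PySem.Int.floordiv s n]) := by
  simp only [solutionLoop]
  rw [if_neg h]

-- uniqueness of Python floor divmod for a positive divisor
theorem fdiv_unique (a b q r : Int) (hb : 0 < b) (h : q * b + r = a)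
    (h0 : 0 ≤ r) (h1 : r < b) :
    PySem.Int.floordiv a b = q ∧ PySem.Int.mod a b = r := by
  have hd := PySem.Int.floordiv_mul_add_mod a b
  have hR0 := PySem.Int.mod_nonneg a hb
  have hR1 := PySem.Int.mod_lt a hb
  have hqQ : PySem.Int.floordiv a b = q := by
    rcases lt_trichotomy (PySem.Int.floordiv a b) q with hlt | heq | hgt
    · exfalso
      have := mul_le_mul_of_nonneg_right
        (show PySem.Int.floordiv a b + 1 ≤ q by omega) (le_of_lt hb)
      nlinarith
    · exact heq
    · exfalso
      have := mul_le_mul_of_nonneg_right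
        (show q + 1 ≤ PySem.Int.floordiv a b by omega) (le_of_lt hb)
      nlinarith
  refine ⟨hqQ, ?_⟩
  have : PySem.Int.floordiv a b * b = q * b := by rw [hqQ]
  linarith

-- closed form of A's loop for positive n = k
theorem solutionLoop_closed (k : Nat) : ∀ (f : Nat) (s : Int) (acc : List Int), k ≤ f → 0 < k →
    solutionLoop f (k : Int) s acc =
      if -(k : Int) < s ∧ s < (k : Int) then [-1]
      else acc ++ List.replicate ((k : Int) - PySem.Int.mod s k).toNat (PySem.Int.floordiv s k)
               ++ List.replicate (PySem.Int.mod s k).toNat (PySem.Int.floordiv s k + 1) := by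
  induction k with
  | zero => intro f s acc _ h; omega
  | succ k ih =>
    intro f s acc hf _
    obtain ⟨f, rfl⟩ : ∃ f', f = f' + 1 := ⟨f - 1, by omega⟩
    have hkpos : (0 : Int) < (k : Int) + 1 := by positivity
    have hk0 : ((k : Int) + 1) ≠ 0 := by omega
    have hcast : ((k + 1 : Nat) : Int) = (k : Int) + 1 := by push_cast; ring
    simp only [hcast]
    rw [solutionLoop_succ f ((k : Int) + 1) s acc hk0]
    have hstep : (k : Int) + 1 - 1 = (k : Int) := by ring
    rw [hstep]
    set q := PySem.Int.floordiv s ((k : Int) + 1) with hq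
    set r := PySem.Int.mod s ((k : Int) + 1) with hr
    have hdm : q * ((k : Int) + 1) + r = s := PySem.Int.floordiv_mul_add_mod s _
    have hr0 : 0 ≤ r := PySem.Int.mod_nonneg s hkpos
    have hrlt : r < (k : Int) + 1 := PySem.Int.mod_lt s hkpos
    clear_value q r
    by_cases hbad : -((k : Int) + 1) < s ∧ s < (k : Int) + 1
    · -- A returns [-1]: the first step already has temp = 0, or (for s < 0) the next one does
      rw [if_pos hbad]
      by_cases hq0 : q = 0
      · rw [if_pos hq0]
      · have hq1 : q = -1 := by
          rcases lt_trichotomy q 0 with h | h | h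
          · by_contra hne
            have h2 : q ≤ -2 := by omega
            nlinarith [mul_le_mul_of_nonneg_right h2 (le_of_lt hkpos)]
          · exact absurd h hq0
          · have h1 : (1 : Int) ≤ q := h
            nlinarith [mul_le_mul_of_nonneg_right h1 (le_of_lt hkpos)]
        have hsval : s = -((k : Int) + 1) + r := by
          have h1 : q * ((k : Int) + 1) = -((k : Int) + 1) := by rw [hq1]; ring
          omega
        have hrpos : 0 < r := by omega
        rw [if_neg (by omega : ¬ q = 0)]
        rcases Nat.eq_zero_or_pos k with hk | hk
        · exfalso
          have : (k : Int) = 0 := by exact_mod_cast hk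
          omega
        · have hkI : (0 : Int) < (k : Int) := by exact_mod_cast hk
          rw [ih f (s - q) (acc ++ [q]) (by omega) hk]
          rw [if_pos ⟨by omega, by omega⟩]
    · rw [if_neg hbad]
      have hqne : q ≠ 0 := by
        intro h; rw [h] at hdm; exact hbad ⟨by omega, by omega⟩
      rw [if_neg hqne]
      rcases Nat.eq_zero_or_pos k with hk | hk
      · -- n = 1: the final slot gets q, and r = 0
        subst hk
        have hr00 : r = 0 := by omega
        simp only [Nat.cast_zero]
        rw [solutionLoop_zero, hr00]
        norm_num [List.replicate]
      · -- n = k+1 ≥ 2: recurse; relate divmod at (k, s - q) to (q, r)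
        have hkI : (0 : Int) < (k : Int) := by exact_mod_cast hk
        rw [ih f (s - q) (acc ++ [q]) (by omega) hk]
        have hsq : s - q = q * (k : Int) + r := by linear_combination -hdm
        have hnotbad : ¬(-(k : Int) < s - q ∧ s - q < (k : Int)) := by
          rintro ⟨h1, h2⟩
          have hrk : r ≤ (k : Int) := by omega
          rcases lt_trichotomy q 0 with hqn | hq00 | hqp
          · rcases eq_or_lt_of_le (show q ≤ -1 by omega) with heq | hlt
            · have hA : q * (k : Int) = -(k : Int) := by rw [heq]; ring
              rcases (show r = 0 ∨ 0 < r by omega) with hr00 | hrp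
              · rw [hr00] at hsq; linarith
              · exact hbad ⟨by linarith, by linarith⟩
            · have hA := mul_le_mul_of_nonneg_right (show q ≤ -2 by omega) (le_of_lt hkI)
              linarith
          · exact hqne hq00
          · have hA := mul_le_mul_of_nonneg_right (show (1 : Int) ≤ q by omega) (le_of_lt hkI)
            linarith
        rw [if_neg hnotbad]
        by_cases he : r = (k : Int)
        · obtain ⟨hq'e, hr'e⟩ := fdiv_unique (s - q) (k : Int) (q + 1) 0 hkI
            (by linear_combination hdm - he) le_rfl hkI
          rw [hq'e, hr'e, he]
          have h3 : ((k : Int)).toNat = k := by omega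
          simp [h3]
        · have hlt : r < (k : Int) := by omega
          obtain ⟨hq'e, hr'e⟩ := fdiv_unique (s - q) (k : Int) q r hkI
            (by linear_combination hdm) hr0 hlt
          rw [hq'e, hr'e]
          have hcnt : ((k : Int) + 1 - r).toNat = ((k : Int) - r).toNat + 1 := by omega
          rw [hcnt, List.replicate_succ]
          simp

-- ===== VERDICT (by name: the statement is the Claim_ definition above) =====
theorem solution_spec : Claim_equal_solution := by
  intro n s _ hpre
  unfold Spec_solution solution solution_alt
  rcases eq_or_lt_of_le hpre with h0 | hpos
  · rw [← h0]; simp [solutionLoop_zero]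
  · obtain ⟨k, rfl⟩ : ∃ k : Nat, n = (k : Int) := ⟨n.toNat, by omega⟩
    have hk : 0 < k := by exact_mod_cast hpos
    rw [show ((k : Int)).toNat = k from by omega,
        solutionLoop_closed k k s [] le_rfl hk]
    rw [if_neg (by omega : ¬((k : Int) = 0))]
    split_ifs <;> simp
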